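-- pv_equiv track=rewrite | github.com/Beomjw/programmers | 프로그래머스/0/181906. 접두사인지 확인하기/접두사인지 확인하기.py | solution
-- ===== SOURCE A (Python) =====
-- def solution(my_string, is_prefix):
--     answer = 0
--     string = []
--     for i in range(len(my_string)):
--         string.append(my_string[:i])
--
--     for s in string:
--         if s == is_prefix:
--             return 1
--     return 0
-- ===== SOURCE B (Python) =====
-- def solution(my_string, is_prefix):
--     if len(is_prefix) >= len(my_string):
--         return 0
--     for i in range(len(is_prefix)):
--         if my_string[i] != is_prefix[i]:
--             return 0
--     return 1
-- ===== Notes on version B (the rewrite author's own statement) =====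
-- stated objective: faster
-- what changed: Instead of materialising every proper prefix of my_string and scanning that list for is_prefix, B does one length guard and a single direct character-comparison loop over is_prefix.
import Mathlib
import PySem

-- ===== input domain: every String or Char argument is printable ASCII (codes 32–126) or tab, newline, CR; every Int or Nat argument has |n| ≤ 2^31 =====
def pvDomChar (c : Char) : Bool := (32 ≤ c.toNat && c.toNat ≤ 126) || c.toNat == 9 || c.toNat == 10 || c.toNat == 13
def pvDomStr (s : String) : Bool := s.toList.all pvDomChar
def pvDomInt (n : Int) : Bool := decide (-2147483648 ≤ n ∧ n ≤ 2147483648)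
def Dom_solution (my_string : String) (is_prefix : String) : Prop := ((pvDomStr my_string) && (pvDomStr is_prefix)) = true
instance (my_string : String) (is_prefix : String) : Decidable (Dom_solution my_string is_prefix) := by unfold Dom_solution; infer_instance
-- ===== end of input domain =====

-- B replaces A's build-all-prefixes-then-scan with a length guard plus one direct character-comparison pass.

-- ===== PORT A =====
-- 'for s in string: if s == is_prefix: return 1' then 'return 0'
def solutionScanA : List String → String → Int
  | [], _ => 0
  | s :: rest, p => if s = p then 1 else solutionScanA rest p

def solution (my_string : String) (is_prefix : String) : Int :=
  let string := (List.range my_string.toList.length).map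
    (fun (i : Nat) => PySem.Str.slice my_string none (some (i : Int)))
  solutionScanA string is_prefix

-- ===== PORT B =====
-- 'for i in range(len(is_prefix)): if my_string[i] != is_prefix[i]: return 0' then 'return 1'
-- (indices are always in range thanks to the length guard, so getD never uses its default)
def solutionLoopB (ms ps : List Char) : List Nat → Int
  | [] => 1
  | i :: rest => if ms.getD i ' ' ≠ ps.getD i ' ' then 0 else solutionLoopB ms ps rest

def solution_alt (my_string : String) (is_prefix : String) : Int :=
  if is_prefix.toList.length ≥ my_string.toList.length then 0
  else solutionLoopB my_string.toList is_prefix.toList (List.range is_prefix.toList.length)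

-- ===== PRECONDITION & SPEC =====
def Spec_solution (my_string : String) (is_prefix : String) (out : Int) : Prop := out = solution_alt my_string is_prefix
instance (my_string : String) (is_prefix : String) (out : Int) : Decidable (Spec_solution my_string is_prefix out) := by unfold Spec_solution; infer_instance

-- ===== CLAIM (what is proved, stated in full; the proofs are below) =====
def Claim_equal_solution : Prop := ∀ (my_string : String) (is_prefix : String), Dom_solution my_string is_prefix → Spec_solution my_string is_prefix (solution my_string is_prefix)

-- ===== LEMMAS AND PROOFS =====

theorem solutionScanA_eq (l : List String) (p : String) :
    solutionScanA l p = if p ∈ l then 1 else 0 := by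
  induction l with
  | nil => simp [solutionScanA]
  | cons s rest ih =>
    by_cases h : s = p
    · simp [solutionScanA, h]
    · simp [solutionScanA, h, ih, Ne.symm h]

theorem solutionLoopB_eq (ms ps : List Char) (l : List Nat) :
    solutionLoopB ms ps l = if ∀ i ∈ l, ms.getD i ' ' = ps.getD i ' ' then 1 else 0 := by
  induction l with
  | nil => simp [solutionLoopB]
  | cons i rest ih =>
    simp only [solutionLoopB, ih, List.forall_mem_cons, List.getD]
    by_cases h : ms[i]?.getD ' ' = ps[i]?.getD ' ' <;> simp [h]

theorem prefix_char (ms ps : List Char) (hlt : ps.length < ms.length) :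
    (∀ i ∈ List.range ps.length, ms.getD i ' ' = ps.getD i ' ') ↔ ms.take ps.length = ps := by
  constructor
  · intro h
    apply List.ext_getElem
    · simp; omega
    · intro i h1 h2
      have := h i (by simpa using h2)
      rw [List.getD_eq_getElem ms ' ' (by omega), List.getD_eq_getElem ps ' ' h2] at this
      simpa [List.getElem_take] using this
  · intro h i hi
    simp only [List.mem_range] at hi
    rw [List.getD_eq_getElem ms ' ' (by omega), List.getD_eq_getElem ps ' ' hi]
    have : (ms.take ps.length)[i]'(by simp; omega) = ps[i]'hi := by
      simp [h]
    simpa [List.getElem_take] using this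

theorem exists_take_iff (ms ps : List Char) :
    (∃ i < ms.length, ms.take i = ps) ↔ ps.length < ms.length ∧ ms.take ps.length = ps := by
  constructor
  · rintro ⟨i, hi, h⟩
    have hl : ps.length = i := by
      rw [← h]; simp; omega
    exact ⟨by omega, by rw [hl]; exact h⟩
  · rintro ⟨h1, h2⟩
    exact ⟨ps.length, h1, h2⟩

-- ===== VERDICT (by name: the statement is the Claim_ definition above) =====
theorem mem_prefixlist_iff (my_string is_prefix : String) :
    (is_prefix ∈ (List.range my_string.toList.length).map
        (fun (i : Nat) => PySem.Str.slice my_string none (some (i : Int)))) ↔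
      ∃ i < my_string.toList.length, my_string.toList.take i = is_prefix.toList := by
  constructor
  · intro hmem
    rcases List.mem_map.mp hmem with ⟨i, hi, h⟩
    rw [List.mem_range] at hi
    refine ⟨i, hi, ?_⟩
    have := congrArg String.toList h.symm
    rw [PySem.Str.toList_slice] at this
    simp only [PySem.Chars.slice] at this
    rwa [PySem.List.slice_to_natCast, eq_comm] at this
  · rintro ⟨i, hi, h⟩
    refine List.mem_map.mpr ⟨i, List.mem_range.mpr hi, ?_⟩
    apply String.toList_injective
    rw [PySem.Str.toList_slice]
    simp only [PySem.Chars.slice]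
    rwa [PySem.List.slice_to_natCast]

-- ===== VERDICT (by name: the statement is the Claim_ definition above) =====
theorem solution_spec : Claim_equal_solution := by
  intro my_string is_prefix _
  unfold Spec_solution solution solution_alt
  rw [solutionScanA_eq]
  by_cases hlen : is_prefix.toList.length ≥ my_string.toList.length
  · rw [if_pos hlen, if_neg]
    intro hmem
    rcases (mem_prefixlist_iff _ _).mp hmem with ⟨i, hi, h⟩
    have : (my_string.toList.take i).length = is_prefix.toList.length := by rw [h]
    rw [List.length_take] at this
    omega
  · rw [if_neg hlen, solutionLoopB_eq]
    have key : (is_prefix ∈ (List.range my_string.toList.length).map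
        (fun (i : Nat) => PySem.Str.slice my_string none (some (i : Int)))) ↔
        (∀ i ∈ List.range is_prefix.toList.length,
          my_string.toList.getD i ' ' = is_prefix.toList.getD i ' ') := by
      rw [mem_prefixlist_iff, exists_take_iff, prefix_char _ _ (by omega)]
      constructor
      · exact fun h => h.2
      · exact fun h => ⟨by omega, h⟩
    simp only [key]
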